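-- pv_equiv track=rewrite | github.com/dylanapplegate/advent | src/2025/day01/python/solution.py | part1
-- ===== SOURCE A (Python) =====
-- def format_input(input: str) -> list[tuple[str, int]]:
--     rotations = [(str(line[:1]), int(line[1:])) for line in input.splitlines() if line]
--     return rotations
--
-- def part1(input: str) -> int:
--     rotations = format_input(input)
--     value = 50
--     zero_count = 0
--
--     for direction, distance in rotations:
--         if direction == "R":
--             value = (value + distance) % 100
--         else:
--             value = (value + (100 - (distance % 100))) % 100
--
--         if value == 0:
--             zero_count += 1
--
--     return zero_count
-- ===== SOURCE B (Python) =====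
-- def format_input(input: str) -> list[tuple[str, int]]:
--     rotations = [(str(line[:1]), int(line[1:])) for line in input.splitlines() if line]
--     return rotations
--
-- def part1(input: str) -> int:
--     deltas = [dist if direction == "R" else -dist
--               for direction, dist in format_input(input)]
--
--     def count_zeros(segment, start):
--         # divide and conquer: how many prefix positions of this segment,
--         # started at absolute offset `start`, land on a multiple of 100
--         if not segment:
--             return 0
--         if len(segment) == 1:
--             return 1 if (start + segment[0]) % 100 == 0 else 0
--         mid = len(segment) // 2
--         left, right = segment[:mid], segment[mid:]
--         return count_zeros(left, start) + count_zeros(right, start + sum(left))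
--
--     return count_zeros(deltas, 50)
-- ===== Notes on version B (the rewrite author's own statement) =====
-- stated objective: alternative
-- what changed: Replaced A's single fused left-to-right stateful loop (running value kept reduced mod 100) by a divide-and-conquer recursion: map rotations to signed deltas, then recursively split the delta list in half, counting zero-hits in the left half from the current offset and in the right half from the offset shifted by the left half's sum; correctness rests on the fact that prefix positions of the right half are the left sum plus its own prefixes.
import Mathlib
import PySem

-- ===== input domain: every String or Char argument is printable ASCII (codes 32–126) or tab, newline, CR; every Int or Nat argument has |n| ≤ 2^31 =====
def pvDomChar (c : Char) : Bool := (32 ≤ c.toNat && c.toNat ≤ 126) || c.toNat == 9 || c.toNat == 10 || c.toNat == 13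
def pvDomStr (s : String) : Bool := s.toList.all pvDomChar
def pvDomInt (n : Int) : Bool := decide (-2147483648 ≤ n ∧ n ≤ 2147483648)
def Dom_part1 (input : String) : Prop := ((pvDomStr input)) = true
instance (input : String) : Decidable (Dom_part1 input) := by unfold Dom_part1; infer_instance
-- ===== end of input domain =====

-- B replaces A's fused mod-100 loop by a divide-and-conquer count over signed deltas (alternative decomposition, same return value).

-- ===== PORT A =====
-- shared parsing helper (both Pythons use the identical format_input); none = some int(line[1:]) raised ValueError
def parseLines : List String → Option (List (String × Int))
  | [] => some []
  | l :: ls =>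
    match PySem.Int.ofStr? (PySem.Str.slice l (some 1) none), parseLines ls with
    | some n, some rest => some ((PySem.Str.slice l none (some 1), n) :: rest)
    | _, _ => none

def formatInput? (input : String) : Option (List (String × Int)) :=
  parseLines ((PySem.Str.splitlines input).filter (fun l => !(l == "")))

def part1 (input : String) : Int :=
  match formatInput? input with
  | none => 0   -- int() raised ValueError: excluded by Pre_part1
  | some rotations =>
    (rotations.foldl (fun (s : Int × Int) dd =>
        let v : Int :=
          if dd.1 == "R" then PySem.Int.mod (s.1 + dd.2) 100
          else PySem.Int.mod (s.1 + (100 - PySem.Int.mod dd.2 100)) 100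
        (v, if v == 0 then s.2 + 1 else s.2)) (50, 0)).2

-- ===== PORT B =====
-- B's divide-and-conquer helper count_zeros(segment, start)
def countZeros : List Int → Int → Int
  | [], _ => 0
  | [d], start => if PySem.Int.mod (start + d) 100 == 0 then 1 else 0
  | a :: b :: tl, start =>
    let mid := (a :: b :: tl).length / 2
    countZeros ((a :: b :: tl).take mid) start +
      countZeros ((a :: b :: tl).drop mid) (start + ((a :: b :: tl).take mid).sum)
  termination_by seg _ => seg.length
  decreasing_by
  · simp [List.length_take]; omega
  · simp [List.length_drop]; omega

def part1_alt (input : String) : Int :=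
  match formatInput? input with
  | none => 0   -- int() raised ValueError: excluded by Pre_part1
  | some rotations =>
    let deltas := rotations.map (fun dd => if dd.1 == "R" then dd.2 else -dd.2)
    countZeros deltas 50

-- ===== PRECONDITION & SPEC =====
-- Pre_ excludes exactly the inputs where int(line[1:]) raises ValueError (both A and B raise there).
def Pre_part1 (input : String) : Prop :=
  (((PySem.Str.splitlines input).filter (fun l => !(l == ""))).all
    (fun l => (PySem.Int.ofStr? (PySem.Str.slice l (some 1) none)).isSome)) = true
instance (input : String) : Decidable (Pre_part1 input) := by unfold Pre_part1; infer_instance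
def pvWitness_part1 : String := "R50\nL100\nR100"

def Spec_part1 (input : String) (out : Int) : Prop := out = part1_alt input
instance (input : String) (out : Int) : Decidable (Spec_part1 input out) := by unfold Spec_part1; infer_instance

-- ===== CLAIM (what is proved, stated in full; the proofs are below) =====
def Claim_equal_part1 : Prop := ∀ (input : String), Dom_part1 input → Pre_part1 input → Spec_part1 input (part1 input)

-- ===== LEMMAS AND PROOFS =====

-- the list of prefix sums starting from t (abstract spec both sides are reduced to)
def bPos (t : Int) : List Int → List Int
  | [] => []
  | d :: ds => (t + d) :: bPos (t + d) ds

lemma bPos_append (l r : List Int) (t : Int) :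
    bPos t (l ++ r) = bPos t l ++ bPos (t + l.sum) r := by
  induction l generalizing t with
  | nil => simp [bPos]
  | cons d l ih => simp [bPos, ih, add_assoc]

lemma hm100 (a : Int) : PySem.Int.mod a 100 = a % 100 :=
  PySem.Int.mod_eq_emod_of_pos (by norm_num)

-- B's divide and conquer counts exactly the prefix positions divisible by 100
lemma countZeros_eq (ds : List Int) (t : Int) :
    countZeros ds t = (((bPos t ds).filter (fun p => p % 100 == 0)).length : Int) := by
  induction ds, t using countZeros.induct with
  | case1 t => simp [countZeros, bPos]
  | case2 d t h =>
    rw [hm100] at h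
    simp [countZeros, bPos, List.filter, h]
  | case3 d t h =>
    rw [hm100] at h
    simp [countZeros, bPos, List.filter, h]
  | case4 a b tl t mid ih1 ih2 =>
    rw [countZeros]
    have hsplit := bPos_append ((a :: b :: tl).take ((a :: b :: tl).length / 2))
      ((a :: b :: tl).drop ((a :: b :: tl).length / 2)) t
    rw [List.take_append_drop] at hsplit
    have e : mid = (a :: b :: tl).length / 2 := rfl
    rw [e] at ih1 ih2
    simp only [ih1, ih2, hsplit, List.filter_append, List.length_append]
    push_cast; ring

-- A's loop body with PySem.Int.mod replaced by Int.emod (0 < 100)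
lemma stepEq :
    (fun (s : Int × Int) (dd : String × Int) =>
        let v : Int :=
          if dd.1 == "R" then PySem.Int.mod (s.1 + dd.2) 100
          else PySem.Int.mod (s.1 + (100 - PySem.Int.mod dd.2 100)) 100
        (v, if v == 0 then s.2 + 1 else s.2))
      = (fun (s : Int × Int) (dd : String × Int) =>
        let v : Int :=
          if dd.1 == "R" then (s.1 + dd.2) % 100
          else (s.1 + (100 - dd.2 % 100)) % 100
        (v, if v == 0 then s.2 + 1 else s.2)) := by
  funext s dd
  simp only [hm100]

-- invariant of A's fused loop: running value = (prefix sum) % 100, counter = multiples seen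
lemma afold (rots : List (String × Int)) (t z : Int) :
    (rots.foldl (fun (s : Int × Int) (dd : String × Int) =>
        let v : Int :=
          if dd.1 == "R" then (s.1 + dd.2) % 100
          else (s.1 + (100 - dd.2 % 100)) % 100
        (v, if v == 0 then s.2 + 1 else s.2)) (t % 100, z)).2
      = z + (((bPos t (rots.map (fun dd => if dd.1 == "R" then dd.2 else -dd.2))).filter
          (fun p => p % 100 == 0)).length : Int) := by
  induction rots generalizing t z with
  | nil => simp [bPos]
  | cons dd rots ih =>
    obtain ⟨d, dist⟩ := dd
    rw [List.foldl_cons, List.map_cons]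
    by_cases hd : (d == "R") = true
    · rw [show (let v : Int :=
            if (d, dist).1 == "R" then ((t % 100, z).1 + (d, dist).2) % 100
            else ((t % 100, z).1 + (100 - (d, dist).2 % 100)) % 100
          (v, if v == 0 then (t % 100, z).2 + 1 else (t % 100, z).2))
          = ((t + dist) % 100, if (t + dist) % 100 == 0 then z + 1 else z) from by
        simp [hd, show (t % 100 + dist) % 100 = (t + dist) % 100 from by omega]]
      rw [show (if (d, dist).1 == "R" then (d, dist).2 else -(d, dist).2) = dist from by
        simp [hd]]
      rw [show bPos t (dist :: List.map (fun dd => if dd.1 == "R" then dd.2 else -dd.2) rots)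
          = (t + dist) :: bPos (t + dist)
              (List.map (fun dd => if dd.1 == "R" then dd.2 else -dd.2) rots) from rfl,
        List.filter_cons]
      by_cases hz : (t + dist) % 100 = 0
      · rw [if_pos (by simpa using hz), if_pos (by simpa using hz), ih (t + dist) (z + 1),
          List.length_cons]
        push_cast; ring
      · rw [if_neg (by simpa using hz), if_neg (by simpa using hz), ih (t + dist) z]
    · rw [show (let v : Int :=
            if (d, dist).1 == "R" then ((t % 100, z).1 + (d, dist).2) % 100
            else ((t % 100, z).1 + (100 - (d, dist).2 % 100)) % 100
          (v, if v == 0 then (t % 100, z).2 + 1 else (t % 100, z).2))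
          = ((t + -dist) % 100, if (t + -dist) % 100 == 0 then z + 1 else z) from by
        simp [hd, show (t % 100 + (100 - dist % 100)) % 100 = (t + -dist) % 100 from by omega]]
      rw [show (if (d, dist).1 == "R" then (d, dist).2 else -(d, dist).2) = -dist from by
        simp [hd]]
      rw [show bPos t (-dist :: List.map (fun dd => if dd.1 == "R" then dd.2 else -dd.2) rots)
          = (t + -dist) :: bPos (t + -dist)
              (List.map (fun dd => if dd.1 == "R" then dd.2 else -dd.2) rots) from rfl,
        List.filter_cons]
      by_cases hz : (t + -dist) % 100 = 0
      · rw [if_pos (by simpa using hz), if_pos (by simpa using hz), ih (t + -dist) (z + 1),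
          List.length_cons]
        push_cast; ring
      · rw [if_neg (by simpa using hz), if_neg (by simpa using hz), ih (t + -dist) z]

-- ===== VERDICT (by name: the statement is the Claim_ definition above) =====
theorem part1_spec : Claim_equal_part1 := by
  intro input _ hpre
  unfold Spec_part1 part1 part1_alt
  cases h : formatInput? input with
  | none => rfl
  | some rots =>
    simp only
    rw [stepEq, show (50 : Int) = (50 : Int) % 100 from by decide, afold rots 50 0,
      countZeros_eq]
    simp
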